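-- pv_equiv track=rewrite | github.com/gjohnston9/rna-mcmc | mcmc.py | root_degree
-- ===== SOURCE A (Python) =====
-- def root_degree(word):
--     degree = 0
--     curr_depth = 0
--     for char in word:
--         if char == 1:
--             if curr_depth == 0:
--                 degree += 1
--             curr_depth += 1
--         else:
--             curr_depth -= 1
--     return degree
-- ===== SOURCE B (Python) =====
-- def root_degree(word):
--     # two-phase: build prefix-depth table, then count openings at depth 0
--     depths = [0]
--     for ch in word:
--         depths.append(depths[-1] + (1 if ch == 1 else -1))
--     return sum(1 for ch, d in zip(word, depths) if ch == 1 and d == 0)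
-- ===== Notes on version B (the rewrite author's own statement) =====
-- stated objective: alternative
-- what changed: B computes an explicit prefix-depth table in one pass and then counts, in a second pass over zip(word, depths), the elements equal to 1 whose preceding depth is 0, instead of A's single fused loop carrying both a degree counter and the running depth.
import Mathlib
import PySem

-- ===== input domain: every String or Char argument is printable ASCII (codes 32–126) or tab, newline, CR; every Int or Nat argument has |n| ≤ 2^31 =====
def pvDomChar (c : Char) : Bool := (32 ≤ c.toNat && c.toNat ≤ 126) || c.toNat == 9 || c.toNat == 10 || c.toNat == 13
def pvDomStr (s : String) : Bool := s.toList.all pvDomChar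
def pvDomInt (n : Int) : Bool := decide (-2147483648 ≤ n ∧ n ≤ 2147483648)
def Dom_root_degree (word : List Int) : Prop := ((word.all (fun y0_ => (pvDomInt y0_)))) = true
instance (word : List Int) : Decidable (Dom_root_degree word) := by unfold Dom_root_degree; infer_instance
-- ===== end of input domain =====

-- B replaces A's fused counting loop by a two-phase computation (explicit prefix-depth table,
-- then a counting pass over zip(word, depths)); same O(n) cost, alternative decomposition.

-- ===== PORT A =====
def root_degree (word : List Int) : Int :=
  (word.foldl (fun (s : Int × Int) char =>
      if char == 1 then
        (if s.2 == 0 then (s.1 + 1, s.2 + 1) else (s.1, s.2 + 1))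
      else (s.1, s.2 - 1)) (0, 0)).1

-- ===== PORT B =====
-- B: builds the prefix-depth table, then counts openings (char = 1) at depth 0.
def root_degree_alt (word : List Int) : Int :=
  let depths : List Int :=
    word.foldl (fun acc ch => acc ++ [acc.getLast! + (if ch == 1 then 1 else -1)]) [0]
  ((word.zip depths).filter (fun p => p.1 == 1 && p.2 == 0)).length

-- ===== PRECONDITION & SPEC =====
def Spec_root_degree (word : List Int) (out : Int) : Prop := out = root_degree_alt word
instance (word : List Int) (out : Int) : Decidable (Spec_root_degree word out) := by unfold Spec_root_degree; infer_instance

-- ===== CLAIM (what is proved, stated in full; the proofs are below) =====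
def Claim_equal_root_degree : Prop := ∀ (word : List Int), Dom_root_degree word → Spec_root_degree word (root_degree word)

-- ===== LEMMAS AND PROOFS =====

-- depths after the first element: depth after each step, starting from d
def scanTail (d : Int) : List Int → List Int
  | [] => []
  | ch :: t => let d' := d + (if ch == 1 then 1 else -1); d' :: scanTail d' t

theorem foldl_depths (word : List Int) (acc : List Int) (h : acc ≠ []) :
    word.foldl (fun acc ch => acc ++ [acc.getLast! + (if ch == 1 then 1 else -1)]) acc
      = acc ++ scanTail (acc.getLast!) word := by
  induction word generalizing acc with
  | nil => simp [scanTail]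
  | cons ch t ih =>
      simp only [List.foldl_cons, scanTail]
      rw [ih _ (by simp)]
      have hl : (acc ++ [acc.getLast! + (if ch == 1 then 1 else -1)]).getLast!
          = acc.getLast! + (if ch == 1 then 1 else -1) := by
        simp [List.getLast!_eq_getLast?_getD, List.getLast?_append]
      rw [hl]
      simp

theorem count_eq (word : List Int) (c d : Int) :
    c + (((word.zip (d :: scanTail d word)).filter
          (fun p => p.1 == 1 && p.2 == 0)).length : Int)
      = (word.foldl (fun (s : Int × Int) char =>
          if char == 1 then
            (if s.2 == 0 then (s.1 + 1, s.2 + 1) else (s.1, s.2 + 1))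
          else (s.1, s.2 - 1)) (c, d)).1 := by
  induction word generalizing c d with
  | nil => simp
  | cons ch t ih =>
      simp only [scanTail, List.zip_cons_cons, List.filter_cons, List.foldl_cons]
      by_cases h1 : ch = 1
      · subst h1
        by_cases h0 : d = 0
        · subst h0
          have ih' := ih (c + 1) 1
          norm_num at ih' ⊢
          rw [← ih']
          ring
        · have hb : ((1:Int) == 1 && d == 0) = false := by simp [h0]
          rw [hb]
          simp only [if_neg (by simp [h0] : ¬ ((d == 0) = true)), if_neg Bool.false_ne_true,
            show (d + (if (1:Int) == 1 then 1 else -1)) = d + 1 by norm_num]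
          have ih' := ih c (d + 1)
          norm_num at ih' ⊢
          exact ih' 
      · have hb : (ch == 1 && d == 0) = false := by simp [h1]
        rw [hb]
        simp only [if_neg (by simp [h1] : ¬ ((ch == 1) = true)), if_neg Bool.false_ne_true]
        exact ih c (d - 1)

-- ===== VERDICT (by name: the statement is the Claim_ definition above) =====
theorem root_degree_spec : Claim_equal_root_degree := by
  intro word _
  show root_degree word = root_degree_alt word
  unfold root_degree root_degree_alt
  rw [foldl_depths word [0] (by simp)]
  simpa using (count_eq word 0 0).symm
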